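-- pv_equiv track=rewrite | github.com/enviro-lab/benchmark-deconvolute | plots/sample_info.py | sort_by_name
-- ===== SOURCE A (Python) =====
-- def sort_by_name(cols):
--     sample_cols = []
--     nfw_cols = []
--     for col in cols:
--         if col.startswith("NFW"):
--             nfw_cols.append(col)
--         else:
--             sample_cols.append(col)
--     return sorted(sample_cols) + nfw_cols
-- ===== SOURCE B (Python) =====
-- def sort_by_name(cols):
--     def is_nfw(col):
--         return col.startswith("NFW")
--     # one stable sort: non-NFW first (alphabetical), NFW after in original order
--     return sorted(cols, key=lambda col: (is_nfw(col), "" if is_nfw(col) else col))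
-- ===== Notes on version B (the rewrite author's own statement) =====
-- stated objective: idiomatic
-- what changed: Replaces the partition-into-two-lists-then-concatenate loop with a single stable sorted() call whose composite key (is_NFW, '' if NFW else col) puts non-NFW columns first alphabetically and keeps NFW columns in arrival order via sort stability.
import Mathlib
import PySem

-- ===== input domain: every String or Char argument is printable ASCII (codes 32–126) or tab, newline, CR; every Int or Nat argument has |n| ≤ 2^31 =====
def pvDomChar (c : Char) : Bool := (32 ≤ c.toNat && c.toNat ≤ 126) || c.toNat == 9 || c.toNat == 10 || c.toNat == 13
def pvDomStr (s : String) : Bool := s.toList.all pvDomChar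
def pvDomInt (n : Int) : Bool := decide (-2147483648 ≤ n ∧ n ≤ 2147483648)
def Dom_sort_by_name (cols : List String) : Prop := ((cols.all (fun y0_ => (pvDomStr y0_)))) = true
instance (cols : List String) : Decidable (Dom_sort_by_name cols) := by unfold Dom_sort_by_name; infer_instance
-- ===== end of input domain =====

-- B replaces A's partition-then-concatenate loop by one stable composite-key sort (idiomatic; same cost).


-- ===== PORT A =====
def sort_by_name (cols : List String) : List String :=
  let r := cols.foldl
    (fun (acc : List String × List String) col =>
      if PySem.Str.startswith col "NFW" then (acc.1, acc.2 ++ [col]) else (acc.1 ++ [col], acc.2))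
    ([], [])
  PySem.List.sorted r.1 (fun x => x) ++ r.2

-- ===== PORT B =====
def sort_by_name_alt (cols : List String) : List String :=
  PySem.List.sorted2 cols (fun col => PySem.Str.startswith col "NFW")
    (fun col => if PySem.Str.startswith col "NFW" then "" else col)

-- ===== PRECONDITION & SPEC =====
def Spec_sort_by_name (cols : List String) (out : List String) : Prop := out = sort_by_name_alt cols
instance (cols : List String) (out : List String) : Decidable (Spec_sort_by_name cols out) := by unfold Spec_sort_by_name; infer_instance

-- ===== CLAIM (what is proved, stated in full; the proofs are below) =====
def Claim_equal_sort_by_name : Prop := ∀ (cols : List String), Dom_sort_by_name cols → Spec_sort_by_name cols (sort_by_name cols)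

-- ===== LEMMAS AND PROOFS =====
def pvNfw (c : String) : Bool := PySem.Str.startswith c "NFW"
def pvK2 (c : String) : String := if pvNfw c then "" else c
def pvLtB (a b : String) : Bool :=
  decide (pvNfw a < pvNfw b) || (!decide (pvNfw b < pvNfw a) && decide (pvK2 a < pvK2 b))

lemma pv_ins_split {α : Type} (pB pA : α → α → Bool) (c : α) (s n : List α)
    (hs : ∀ x ∈ s, pB c x = pA c x) (hn : ∀ h t, n = h :: t → pB c h = true) :
    PySem.List.insertBy pB c (s ++ n) = PySem.List.insertBy pA c s ++ n := by
  induction s with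
  | nil =>
    cases n with
    | nil => simp [PySem.List.insertBy]
    | cons h t => simp [PySem.List.insertBy, hn h t rfl]
  | cons y s ih =>
    have hy := hs y (by simp)
    by_cases h : pA c y = true
    · simp [PySem.List.insertBy, hy, h]
    · have h' : pA c y = false := by simpa using h
      simp [PySem.List.insertBy, hy, h',
        ih (fun x hx => hs x (List.mem_cons_of_mem _ hx))]

lemma pv_part_foldl (p : String → Bool) (l s n : List String) :
    l.foldl (fun acc col => if p col then (acc.1, acc.2 ++ [col]) else (acc.1 ++ [col], acc.2)) (s, n)
      = (s ++ l.filter (fun c => !p c), n ++ l.filter p) := by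
  induction l generalizing s n with
  | nil => simp
  | cons c l ih => by_cases h : p c <;> simp [h, ih]

lemma pv_main_loop (cols : List String) : ∀ (s n : List String),
    (∀ x ∈ s, pvNfw x = false) → (∀ x ∈ n, pvNfw x = true) →
    cols.foldl (fun acc x => PySem.List.insertBy pvLtB x acc) (s ++ n)
      = (cols.filter (fun c => !pvNfw c)).foldl
          (fun acc x => PySem.List.insertBy (fun a b => decide (a < b)) x acc) s
        ++ (n ++ cols.filter pvNfw) := by
  induction cols with
  | nil => intro s n _ _; simp
  | cons c cols ih =>
    intro s n hs hn
    by_cases hc : pvNfw c = true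
    · have hins : PySem.List.insertBy pvLtB c (s ++ n) = (s ++ n) ++ [c] := by
        apply PySem.List.insertBy_of_forall_not_before
        intro y hy
        rcases List.mem_append.1 hy with h | h
        · simp [pvLtB, pvK2, hc, hs y h]
        · simp [pvLtB, pvK2, hc, hn y h]
      rw [List.foldl_cons, hins, List.append_assoc]
      rw [ih s (n ++ [c]) hs (by
        intro x hx
        rcases List.mem_append.1 hx with h | h
        · exact hn x h
        · simpa [List.mem_singleton.1 h] using hc)]
      simp [hc]
    · have hcf : pvNfw c = false := by simpa using hc
      have hins : PySem.List.insertBy pvLtB c (s ++ n)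
          = PySem.List.insertBy (fun a b => decide (a < b)) c s ++ n := by
        apply pv_ins_split
        · intro x hx
          simp [pvLtB, pvK2, hcf, hs x hx]
        · intro h t hnt
          have : pvNfw h = true := hn h (by rw [hnt]; simp)
          simp [pvLtB, hcf, this]
      rw [List.foldl_cons, hins]
      have hs' : ∀ x ∈ PySem.List.insertBy (fun a b => decide (a < b)) c s, pvNfw x = false := by
        intro x hx
        rcases (PySem.List.mem_insertBy _ _ _ _).1 hx with rfl | h
        · exact hcf
        · exact hs x h
      rw [ih _ n hs' hn]
      simp [hcf]

-- ===== VERDICT (by name: the statement is the Claim_ definition above) =====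
theorem sort_by_name_spec : Claim_equal_sort_by_name := by
  intro cols _
  show sort_by_name cols = sort_by_name_alt cols
  unfold sort_by_name sort_by_name_alt
  rw [pv_part_foldl]
  simp only [PySem.List.sorted2, List.nil_append]
  rw [PySem.List.sorted_eq_foldl_insertBy]
  have := pv_main_loop cols [] [] (by simp) (by simp)
  simp only [List.append_nil, List.nil_append] at this
  exact this.symm
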